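-- pv_equiv track=rewrite | github.com/TmP440/hw_uni | tasks/i18_happiness/happiness.py | am_i_happy
-- ===== SOURCE A (Python) =====
-- def am_i_happy(list_numbers: list[int], good_set: set[int], bad_set: set[int]) -> int:
--
--     my_happiness: int = 0
--
--     for num in list_numbers:
--         if num in good_set:
--             my_happiness += 1
--         elif num in bad_set:
--             my_happiness -= 1
--
--     return my_happiness
-- ===== SOURCE B (Python) =====
-- from collections import Counter
--
-- def am_i_happy(list_numbers: list[int], good_set: set[int], bad_set: set[int]) -> int:
--     counts = Counter(list_numbers)
--     plus = sum(cnt for v, cnt in counts.items() if v in good_set)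
--     minus = sum(cnt for v, cnt in counts.items() if v in bad_set and v not in good_set)
--     return plus - minus
-- ===== Notes on version B (the rewrite author's own statement) =====
-- stated objective: alternative
-- what changed: B builds a Counter frequency table once and computes two independent filtered sums (total multiplicity of good values, and of bad-but-not-good values) and returns their difference, instead of A's single element-by-element loop with a branching accumulator.
import Mathlib
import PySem

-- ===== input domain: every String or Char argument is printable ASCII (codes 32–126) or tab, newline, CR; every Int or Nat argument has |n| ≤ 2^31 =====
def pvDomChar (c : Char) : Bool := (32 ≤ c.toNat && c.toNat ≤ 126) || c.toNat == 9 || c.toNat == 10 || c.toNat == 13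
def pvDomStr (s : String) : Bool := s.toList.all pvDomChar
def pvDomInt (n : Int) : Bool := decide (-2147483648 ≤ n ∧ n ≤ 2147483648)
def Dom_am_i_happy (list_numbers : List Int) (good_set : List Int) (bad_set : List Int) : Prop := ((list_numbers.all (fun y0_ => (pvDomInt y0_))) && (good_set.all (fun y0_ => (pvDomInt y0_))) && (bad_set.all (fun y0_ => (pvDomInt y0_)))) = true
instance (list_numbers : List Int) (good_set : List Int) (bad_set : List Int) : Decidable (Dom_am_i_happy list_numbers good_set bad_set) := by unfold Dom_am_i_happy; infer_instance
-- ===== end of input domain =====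

-- B replaces A's single branching loop by a Counter frequency table and two independent
-- filtered sums (good multiplicity minus bad-but-not-good multiplicity); alternative
-- decomposition, same exact return value.

-- ===== PORT A =====
-- for num in list_numbers: if num in good_set: +1 elif num in bad_set: -1
def am_i_happy (list_numbers : List Int) (good_set : List Int) (bad_set : List Int) : Int :=
  list_numbers.foldl
    (fun my_happiness num =>
      if good_set.contains num then my_happiness + 1
      else if bad_set.contains num then my_happiness - 1
      else my_happiness)
    0

-- ===== PORT B =====
-- counts = Counter(list_numbers); plus = sum of counts over good keys;
-- minus = sum of counts over bad-and-not-good keys; return plus - minus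
def am_i_happy_alt (list_numbers : List Int) (good_set : List Int) (bad_set : List Int) : Int :=
  let counts := PySem.Dict.counter list_numbers
  let plus := ((counts.items.filter (fun p => good_set.contains p.1)).map Prod.snd).sum
  let minus := ((counts.items.filter
      (fun p => bad_set.contains p.1 && !good_set.contains p.1)).map Prod.snd).sum
  plus - minus

-- ===== PRECONDITION & SPEC =====
def Spec_am_i_happy (list_numbers : List Int) (good_set : List Int) (bad_set : List Int) (out : Int) : Prop := out = am_i_happy_alt list_numbers good_set bad_set
instance (list_numbers : List Int) (good_set : List Int) (bad_set : List Int) (out : Int) : Decidable (Spec_am_i_happy list_numbers good_set bad_set out) := by unfold Spec_am_i_happy; infer_instance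

-- ===== CLAIM (what is proved, stated in full; the proofs are below) =====
def Claim_equal_am_i_happy : Prop := ∀ (list_numbers : List Int) (good_set : List Int) (bad_set : List Int), Dom_am_i_happy list_numbers good_set bad_set → Spec_am_i_happy list_numbers good_set bad_set (am_i_happy list_numbers good_set bad_set)

-- ===== LEMMAS AND PROOFS =====

-- per-element weight of a value in A's loop
def pvWeight (good_set bad_set : List Int) (x : Int) : Int :=
  if x ∈ good_set then 1 else if x ∈ bad_set then -1 else 0

-- A's fold equals the sum of weights over the list
theorem pv_aiH_eq (l g b : List Int) :
    am_i_happy l g b = (l.map (pvWeight g b)).sum := by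
  unfold am_i_happy
  suffices h : ∀ (l : List Int) (init : Int),
      l.foldl (fun a num =>
        if g.contains num then a + 1 else if b.contains num then a - 1 else a) init
      = init + (l.map (pvWeight g b)).sum by
    simpa using h l 0
  intro l
  induction l with
  | nil => intro init; simp
  | cons x t ih =>
    intro init
    rw [List.foldl_cons, ih, List.map_cons, List.sum_cons]
    by_cases h1 : x ∈ g
    · simp only [pvWeight, List.contains_eq_mem, h1, decide_true, if_pos]; ring
    · by_cases h2 : x ∈ b
      · simp [pvWeight, h1, h2]; ring
      · simp [pvWeight, h1, h2]

-- the two filtered count-sums over a key list combine into one weighted sum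
theorem pv_filter_split (g b : List Int) (cnt : Int → Int) :
    ∀ (d : List Int),
      ((d.filter (fun k => g.contains k)).map cnt).sum
        - ((d.filter (fun k => b.contains k && !g.contains k)).map cnt).sum
      = (d.map (fun k => cnt k * pvWeight g b k)).sum := by
  intro d
  induction d with
  | nil => simp
  | cons x t ih =>
    rw [List.filter_cons, List.filter_cons]
    by_cases h1 : x ∈ g
    · rw [if_pos (by simp [h1]), if_neg (by simp [h1]),
        List.map_cons, List.sum_cons, List.map_cons, List.sum_cons, ← ih]
      have hw : pvWeight g b x = 1 := by simp [pvWeight, h1]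
      rw [hw]; ring
    · by_cases h2 : x ∈ b
      · rw [if_neg (by simp [h1]), if_pos (by simp [h1, h2]),
          List.map_cons, List.sum_cons, List.map_cons, List.sum_cons, ← ih]
        have hw : pvWeight g b x = -1 := by simp [pvWeight, h1, h2]
        rw [hw]; ring
      · rw [if_neg (by simp [h1]), if_neg (by simp [h1, h2]),
          List.map_cons, List.sum_cons, ← ih]
        have hw : pvWeight g b x = 0 := by simp [pvWeight, h1, h2]
        rw [hw]; ring

-- summing a weighted count over a Nodup cover of l equals summing weights over l
theorem pv_sum_counts (w : Int → Int) :
    ∀ (l d : List Int), d.Nodup → (∀ x ∈ l, x ∈ d) →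
      (d.map (fun k => (l.count k : Int) * w k)).sum = (l.map w).sum := by
  intro l
  induction l with
  | nil => intro d _ _; simp
  | cons x t ih =>
    intro d hd hmem
    have hx : x ∈ d := hmem x (by simp)
    have htm : ∀ y ∈ t, y ∈ d := fun y hy => hmem y (by simp [hy])
    have hsplit : (d.map (fun k => ((x :: t).count k : Int) * w k)).sum
        = (d.map (fun k => (t.count k : Int) * w k)).sum
          + (d.map (fun k => if k = x then w k else 0)).sum := by
      rw [← List.sum_map_add]
      apply congrArg
      apply List.map_congr_left
      intro k _
      by_cases h : k = x
      · subst h; simp; ring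
      · simp [List.count_cons, h]
        exact Or.inl (fun he => h he.symm)
    have hone : ∀ (d : List Int), d.Nodup → x ∈ d →
        (d.map (fun k => if k = x then w k else 0)).sum = w x := by
      intro d
      induction d with
      | nil => intro _ h; simp at h
      | cons y r ihr =>
        intro hnd hmem'
        rcases List.mem_cons.mp hmem' with h | h
        · have hz : (r.map (fun k => if k = x then w k else 0)).sum = 0 := by
            apply List.sum_eq_zero
            intro z hz
            rcases List.mem_map.mp hz with ⟨k, hk, hke⟩
            have hkx : k ≠ x := fun he => (List.nodup_cons.mp hnd).1 (h ▸ he ▸ hk)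
            rw [← hke]; simp [hkx]
          simp [← h, hz]
        · have hyx : y ≠ x := fun he => (List.nodup_cons.mp hnd).1 (he ▸ h)
          simp [hyx, ihr (List.nodup_cons.mp hnd).2 h]
    rw [hsplit, ih d hd htm, hone d hd hx]
    simp [add_comm]

-- B's two filtered sums equal the weighted sum over the distinct values
theorem pv_aiH_alt_eq (l g b : List Int) :
    am_i_happy_alt l g b
      = ((PySem.Set.ofList l).map (fun k => (l.count k : Int) * pvWeight g b k)).sum := by
  have h : am_i_happy_alt l g b
      = (((PySem.Dict.counter l).items.filter (fun p => g.contains p.1)).map Prod.snd).sum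
        - (((PySem.Dict.counter l).items.filter
            (fun p => b.contains p.1 && !g.contains p.1)).map Prod.snd).sum := rfl
  rw [h, PySem.Dict.items_counter]
  simp only [List.filter_map, List.map_map]
  rw [← pv_filter_split g b (fun k => (l.count k : Int)) (PySem.Set.ofList l)]
  rfl

-- ===== VERDICT (by name: the statement is the Claim_ definition above) =====
theorem am_i_happy_spec : Claim_equal_am_i_happy := by
  intro l g b _
  unfold Spec_am_i_happy
  rw [pv_aiH_eq, pv_aiH_alt_eq]
  rw [pv_sum_counts (pvWeight g b) l (PySem.Set.ofList l)
    (PySem.Set.nodup_ofList l) (fun x hx => (PySem.Set.mem_ofList l x).mpr hx)]
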